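-- pv_equiv track=rewrite | github.com/miliar/Code_Jam_Webscraper | Solutions_python/Problem_199/814.py | flipAt
-- ===== SOURCE A (Python) =====
-- def inverse(p):
--     if p=='-':
--         return '+'
--     return '-'
--
-- def flipAt(pancakes, s, k):
--     o = ""
--     for i, p in enumerate(pancakes):
--         if s <= i and i < s+k:
--             o += inverse(p)
--         else:
--             o += p
--     return o
-- ===== SOURCE B (Python) =====
-- def flipAt(pancakes, s, k):
--     n = len(pancakes)
--     lo = max(0, min(n, s))
--     hi = max(lo, min(n, s + k))
--     flipped = ''.join('+' if c == '-' else '-' for c in pancakes[lo:hi])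
--     return pancakes[:lo] + flipped + pancakes[hi:]
-- ===== Notes on version B (the rewrite author's own statement) =====
-- stated objective: faster
-- what changed: Replaces the single pass with a per-index range test and character-by-character string concatenation by a three-way split: clamp [s,s+k) into [lo,hi), keep the prefix and suffix slices unchanged and flip only the middle slice via join.
import Mathlib
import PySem

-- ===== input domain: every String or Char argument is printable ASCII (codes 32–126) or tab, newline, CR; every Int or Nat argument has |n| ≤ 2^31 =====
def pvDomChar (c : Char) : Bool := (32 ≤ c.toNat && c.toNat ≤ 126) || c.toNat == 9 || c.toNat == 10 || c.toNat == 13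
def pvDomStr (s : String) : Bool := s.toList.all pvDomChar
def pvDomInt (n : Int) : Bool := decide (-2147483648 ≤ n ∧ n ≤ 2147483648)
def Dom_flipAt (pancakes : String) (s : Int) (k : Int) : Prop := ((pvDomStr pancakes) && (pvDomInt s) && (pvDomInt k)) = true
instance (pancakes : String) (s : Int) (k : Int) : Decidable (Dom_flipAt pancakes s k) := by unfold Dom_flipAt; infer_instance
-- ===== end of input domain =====

-- B replaces A's per-index range test with a prefix/flipped-middle/suffix slice decomposition (alternative decomposition, same result).


-- ===== PORT A =====
def inverseA (p : Char) : Char := if p = '-' then '+' else '-'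

def flipAt (pancakes : String) (s : Int) (k : Int) : String :=
  String.mk ((PySem.List.enumerate pancakes.toList 0).foldl
    (fun o ip => o ++ [if s ≤ ip.1 ∧ ip.1 < s + k then inverseA ip.2 else ip.2]) [])

-- ===== PORT B =====
def flipAt_alt (pancakes : String) (s : Int) (k : Int) : String :=
  let l := pancakes.toList
  let n : Int := l.length
  let lo := max 0 (min n s)
  let hi := max lo (min n (s + k))
  let flipped := (PySem.List.slice l (some lo) (some hi)).map (fun c => if c = '-' then '+' else '-')
  String.mk (PySem.List.slice l none (some lo) ++ flipped ++ PySem.List.slice l (some hi) none)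

-- ===== PRECONDITION & SPEC =====
def Spec_flipAt (pancakes : String) (s : Int) (k : Int) (out : String) : Prop := out = flipAt_alt pancakes s k
instance (pancakes : String) (s : Int) (k : Int) (out : String) : Decidable (Spec_flipAt pancakes s k out) := by unfold Spec_flipAt; infer_instance

-- ===== CLAIM (what is proved, stated in full; the proofs are below) =====
def Claim_equal_flipAt : Prop := ∀ (pancakes : String) (s : Int) (k : Int), Dom_flipAt pancakes s k → Spec_flipAt pancakes s k (flipAt pancakes s k)

-- ===== LEMMAS AND PROOFS =====

lemma core (l : List Char) (s k : Int) (a b : Nat)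
    (ha : a = (max 0 (min (l.length : Int) s)).toNat)
    (hb : b = (max (max 0 (min (l.length : Int) s)) (min (l.length : Int) (s + k))).toNat) :
    (PySem.List.enumerate l 0).map
      (fun ip => if s ≤ ip.1 ∧ ip.1 < s + k then inverseA ip.2 else ip.2)
    = l.take a ++ ((l.drop a).take (b - a)).map (fun c : Char => if c = '-' then '+' else '-') ++ l.drop b := by
  have hab : a ≤ b := by omega
  have hbn : b ≤ l.length := by omega
  apply List.ext_getElem
  · simp [PySem.List.length_enumerate]; omega
  · intro i h1 h2
    have hiN : i < l.length := by simpa [PySem.List.length_enumerate] using h1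
    rw [List.getElem_map, PySem.List.getElem_enumerate]
    simp only [zero_add]
    by_cases hia : i < a
    · rw [List.getElem_append_left (by simp; omega), List.getElem_append_left (by simp; omega),
          List.getElem_take]
      have : ¬ (s ≤ (i : Int) ∧ (i : Int) < s + k) := by omega
      simp [this]
    · by_cases hib : i < b
      · rw [List.getElem_append_left (by simp; omega)]
        rw [List.getElem_append_right (by simp; omega), List.getElem_map]
        have hcond : s ≤ (i : Int) ∧ (i : Int) < s + k := by omega
        rw [List.getElem_take, List.getElem_drop]
        have hidx : a + (i - (l.take a).length) = i := by simp; omega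
        simp only [hidx, hcond, if_pos, and_self, inverseA]
      · rw [List.getElem_append_right (by simp; omega)]
        have hidx : b + (i - (l.take a ++ ((l.drop a).take (b - a)).map (fun c : Char => if c = '-' then '+' else '-')).length) = i := by
          simp only [List.length_append, List.length_take, List.length_map, List.length_drop]
          omega
        have hx : (l.drop b)[i - (l.take a ++ ((l.drop a).take (b - a)).map (fun c : Char => if c = '-' then '+' else '-')).length]'(by
              simp only [List.length_drop]
              simp only [List.length_append, List.length_take, List.length_map,
                List.length_drop] at h2 ⊢
              omega) = l[i] := by
          simp only [List.getElem_drop, hidx]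
        rw [hx]
        have : ¬ (s ≤ (i : Int) ∧ (i : Int) < s + k) := by
          rintro ⟨h3, h4⟩; omega
        simp [this]

-- ===== VERDICT (by name: the statement is the Claim_ definition above) =====
theorem flipAt_spec : Claim_equal_flipAt := by
  intro pancakes s k _
  show flipAt pancakes s k = flipAt_alt pancakes s k
  unfold flipAt flipAt_alt
  simp only []
  rw [PySem.List.foldl_append_singleton_eq_map]
  set l := pancakes.toList with hl
  set N : Int := (l.length : Int) with hN
  have hlo : (0 : Int) ≤ max 0 (min N s) := by omega
  have hhi : (0 : Int) ≤ max (max 0 (min N s)) (min N (s + k)) := by omega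
  rw [show PySem.List.slice l none (some (max 0 (min N s))) = l.take (max 0 (min N s)).toNat from
        PySem.List.slice_to l hlo,
      show PySem.List.slice l (some (max (max 0 (min N s)) (min N (s + k)))) none
          = l.drop (max (max 0 (min N s)) (min N (s + k))).toNat from
        PySem.List.slice_from l hhi,
      show PySem.List.slice l (some (max 0 (min N s)))
            (some (max (max 0 (min N s)) (min N (s + k))))
          = (l.drop (max 0 (min N s)).toNat).take
              ((max (max 0 (min N s)) (min N (s + k))).toNat - (max 0 (min N s)).toNat) from
        PySem.List.slice_toNat l hlo hhi,
      List.nil_append]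
  exact congrArg String.mk (core l s k _ _ rfl rfl)
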